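-- pv_equiv track=rewrite | github.com/ALT-Browne/Codewars | Catching_Car_Milage_Numbers/Catching_Car_Milage_Numbers.py | dec_seq
-- ===== SOURCE A (Python) =====
-- def dec_seq(number):
--     if str(number)[-1] == "0" and str(number)[-2] == "1":
--         num_string = str(number)[ : -1]
--     else:
--         num_string = str(number)
--     for i in range(0, len(num_string) - 1):
--         if int(num_string[i + 1]) != int(num_string[i]) - 1:
--             return False
--     return True
-- ===== SOURCE B (Python) =====
-- def _check(s):
--     d = int(s[0])
--     return s == ''.join(str(d - i) for i in range(len(s)))
--
--
-- def dec_seq(number):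
--     s = str(number)
--     if s.endswith("10"):
--         s = s[:-1]
--     return _check(s)
-- ===== Notes on version B (the rewrite author's own statement) =====
-- stated objective: simpler
-- what changed: Instead of scanning consecutive digit pairs and comparing differences, B derives the whole expected decreasing digit string from the first digit and does a single string equality check.
-- outside the precondition, e.g. on dec_seq(0): A raises IndexError, B returns True
import Mathlib
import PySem

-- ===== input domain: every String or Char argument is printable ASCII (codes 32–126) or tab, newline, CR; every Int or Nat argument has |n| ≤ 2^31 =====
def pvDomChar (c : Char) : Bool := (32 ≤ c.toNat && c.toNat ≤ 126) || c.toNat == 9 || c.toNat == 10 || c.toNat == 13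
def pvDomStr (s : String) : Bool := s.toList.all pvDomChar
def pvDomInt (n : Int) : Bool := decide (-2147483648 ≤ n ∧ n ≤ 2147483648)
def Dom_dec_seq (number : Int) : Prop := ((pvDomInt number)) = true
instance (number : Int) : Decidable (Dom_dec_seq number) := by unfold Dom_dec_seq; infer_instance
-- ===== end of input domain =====

-- B replaces A's pairwise consecutive-digit-difference scan by building the expected
-- decreasing digit string from the first digit and doing one equality check (objective: simpler).

-- ===== PORT A =====
-- the for-loop over range(0, len(num_string)-1); none = a raised ValueError/IndexError inside the loop
def decSeqLoop (s : String) : List Int → Option Bool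
  | [] => some true
  | i :: rest =>
    match PySem.Str.pyGet? s (i + 1), PySem.Str.pyGet? s i with
    | some c1, some c0 =>
      match PySem.Int.ofChars? [c1], PySem.Int.ofChars? [c0] with
      | some v1, some v0 => if v1 ≠ v0 - 1 then some false else decSeqLoop s rest
      | _, _ => none
    | _, _ => none

def dec_seq (number : Int) : Bool :=
  let s := PySem.Int.toStr number
  -- str(number)[-1] == "0" and str(number)[-2] == "1"  (short-circuit; none = IndexError)
  let num_string? : Option String :=
    match PySem.Str.pyGet? s (-1) with
    | none => none
    | some c1 =>
      if c1 = '0' then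
        match PySem.Str.pyGet? s (-2) with
        | none => none
        | some c2 => some (if c2 = '1' then PySem.Str.slice s none (some (-1)) else s)
      else some s
  match num_string? with
  | none => false  -- IndexError: outside Pre_
  | some ns => (decSeqLoop ns (PySem.List.pyRange 0 (PySem.Str.len ns - 1) 1)).getD false

-- ===== PORT B =====
-- _check(s): d = int(s[0]); return s == ''.join(str(d - i) for i in range(len(s)))
def altCheck (s : String) : Bool :=
  match PySem.Str.pyGet? s 0 with
  | none => false  -- unreachable: str(number) is nonempty
  | some c =>
    match PySem.Int.ofChars? [c] with
    | none => false  -- ValueError on int(s[0]): outside Pre_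
    | some d =>
      s == PySem.Str.join "" ((PySem.List.pyRange 0 (PySem.Str.len s) 1).map (fun i => PySem.Int.toStr (d - i)))

def dec_seq_alt (number : Int) : Bool :=
  let s0 := PySem.Int.toStr number
  let s := if PySem.Str.endswith s0 "10" then PySem.Str.slice s0 none (some (-1)) else s0
  altCheck s

-- ===== PRECONDITION & SPEC =====
-- A raises on every number ≤ 0 (IndexError at str(0)[-2] for 0, ValueError at int('-') for negatives)
def Pre_dec_seq (number : Int) : Prop := 1 ≤ number
instance (number : Int) : Decidable (Pre_dec_seq number) := by unfold Pre_dec_seq; infer_instance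
def pvWitness_dec_seq : Int := (321)

def Spec_dec_seq (number : Int) (out : Bool) : Prop := out = dec_seq_alt number
instance (number : Int) (out : Bool) : Decidable (Spec_dec_seq number out) := by unfold Spec_dec_seq; infer_instance

-- ===== CLAIM (what is proved, stated in full; the proofs are below) =====
def Claim_equal_dec_seq : Prop := ∀ (number : Int), Dom_dec_seq number → Pre_dec_seq number → Spec_dec_seq number (dec_seq number)

-- ===== LEMMAS AND PROOFS =====

def digs : List Char := ['0','1','2','3','4','5','6','7','8','9']
def dval (c : Char) : Int := (c.toNat : Int) - 48

def goodFrom (d : Int) : List Char → Bool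
  | [] => true
  | c :: cs => (dval c == d) && goodFrom (d - 1) cs

def good : List Char → Bool
  | [] => true
  | [_] => true
  | a :: b :: r => (dval b == dval a - 1) && good (b :: r)

theorem digitChar_mem_digs {m : Nat} (h : m < 10) : Nat.digitChar m ∈ digs := by
  interval_cases m <;> decide

theorem toDigitsCore_mem {fuel n : Nat} {ds : List Char} (h : ∀ c ∈ ds, c ∈ digs) :
    ∀ c ∈ Nat.toDigitsCore 10 fuel n ds, c ∈ digs := by
  induction fuel generalizing n ds with
  | zero => simpa [Nat.toDigitsCore] using h
  | succ fuel ih =>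
    simp only [Nat.toDigitsCore]
    split
    · intro c hc
      rcases List.mem_cons.mp hc with rfl | hc
      · exact digitChar_mem_digs (Nat.mod_lt _ (by omega))
      · exact h c hc
    · exact ih (by
        intro c hc
        rcases List.mem_cons.mp hc with rfl | hc
        · exact digitChar_mem_digs (Nat.mod_lt _ (by omega))
        · exact h c hc)

theorem toDigitsCore_length_ge (fuel n : Nat) (ds : List Char) :
    ds.length ≤ (Nat.toDigitsCore 10 fuel n ds).length := by
  induction fuel generalizing n ds with
  | zero => simp [Nat.toDigitsCore]
  | succ fuel ih =>
    simp only [Nat.toDigitsCore]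
    split
    · simp
    · calc ds.length ≤ (Nat.digitChar (n % 10) :: ds).length := by simp
        _ ≤ _ := ih _ _

theorem toDigitsCore_length_ge_succ {fuel : Nat} (n : Nat) (ds : List Char) (h : 0 < fuel) :
    ds.length + 1 ≤ (Nat.toDigitsCore 10 fuel n ds).length := by
  obtain ⟨fuel, rfl⟩ : ∃ f, fuel = f + 1 := ⟨fuel - 1, by omega⟩
  simp only [Nat.toDigitsCore]
  split
  · simp
  · calc ds.length + 1 = (Nat.digitChar (n % 10) :: ds).length := by simp
      _ ≤ _ := toDigitsCore_length_ge _ _ _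

theorem toDigits_ne_nil (m : Nat) : Nat.toDigits 10 m ≠ [] := by
  have := toDigitsCore_length_ge_succ (fuel := m + 1) m [] (by omega)
  intro h; rw [Nat.toDigits] at h; simp [h] at this

theorem toDigits_len2_of_ge10 {m : Nat} (h : 10 ≤ m) : 2 ≤ (Nat.toDigits 10 m).length := by
  rw [Nat.toDigits]
  have h10 : ¬ (m / 10 = 0) := by omega
  simp only [Nat.toDigitsCore, h10, if_false]
  have := toDigitsCore_length_ge_succ (fuel := m) (m / 10) [Nat.digitChar (m % 10)] (by omega)
  simpa using this

theorem toChars_small {e : Int} (h0 : 0 ≤ e) (h9 : e ≤ 9) :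
    PySem.Int.toChars e = [Nat.digitChar e.toNat] := by
  interval_cases e <;> decide

theorem dval_digitChar {e : Int} (h0 : 0 ≤ e) (h9 : e ≤ 9) :
    dval (Nat.digitChar e.toNat) = e := by
  interval_cases e <;> decide

theorem dval_bounds {c : Char} (hc : c ∈ digs) : 0 ≤ dval c ∧ dval c ≤ 9 := by
  fin_cases hc <;> decide

theorem ofChars?_digit {c : Char} (hc : c ∈ digs) :
    PySem.Int.ofChars? [c] = some (dval c) := by
  fin_cases hc <;> decide

theorem toChars_of_neg {e : Int} (h : e < 0) :
    PySem.Int.toChars e = '-' :: Nat.toDigits 10 e.natAbs := by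
  simp [PySem.Int.toChars, h]

theorem toChars_of_nonneg {e : Int} (h : 0 ≤ e) :
    PySem.Int.toChars e = Nat.toDigits 10 e.toNat := by
  simp [PySem.Int.toChars, not_lt.mpr h]

theorem toChars_singleton_val {c : Char} {e : Int} (hc : c ∈ digs) (hd : dval c = e) :
    PySem.Int.toChars e = [c] := by
  subst hd
  obtain ⟨h0, h9⟩ := dval_bounds hc
  rw [toChars_small h0 h9]
  fin_cases hc <;> decide

theorem join_nil_eq_flatten (ps : List (List Char)) :
    PySem.Chars.join [] ps = ps.flatten := by
  induction ps with
  | nil => simp [PySem.Chars.join_nil]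
  | cons p ps ih =>
    cases ps with
    | nil => simp [PySem.Chars.join_singleton]
    | cons q qs => simp [PySem.Chars.join_cons_cons, ih]

-- B's equality check equals the goodFrom chain predicate
theorem goodFrom_eq_decide (l : List Char) (hl : ∀ c ∈ l, c ∈ digs) :
    ∀ d : Int, d ≤ 9 →
      goodFrom d l
        = decide (l = ((List.range l.length).map (fun i : Nat => PySem.Int.toChars (d - i))).flatten) := by
  induction l with
  | nil => intro d _; simp [goodFrom]
  | cons c cs ih =>
    intro d hd9
    have hc : c ∈ digs := hl c (List.mem_cons_self ..)
    have hcs : ∀ x ∈ cs, x ∈ digs := fun x hx => hl x (List.mem_cons_of_mem _ hx)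
    have hsplit :
        ((List.range (c :: cs).length).map (fun i : Nat => PySem.Int.toChars (d - i))).flatten
          = PySem.Int.toChars d
            ++ ((List.range cs.length).map (fun i : Nat => PySem.Int.toChars ((d - 1) - i))).flatten := by
      rw [List.length_cons, List.range_succ_eq_map, List.map_cons, List.map_map]
      simp only [List.flatten_cons, Int.natCast_zero, sub_zero]
      congr 2
      apply List.map_congr_left
      intro i _
      simp only [Function.comp]
      congr 1
      push_cast
      ring
    rw [hsplit]
    by_cases hval : dval c = d
    · have hone : PySem.Int.toChars d = [c] := toChars_singleton_val hc hval
      rw [hone]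
      simp only [goodFrom, hval, beq_self_eq_true, Bool.true_and]
      rw [ih hcs (d - 1) (by omega)]
      simp
    · have hbeq : (dval c == d) = false := by simp [hval]
      simp only [goodFrom, hbeq, Bool.false_and]
      symm
      rw [decide_eq_false_iff_not]
      intro h
      rcases lt_or_ge d 0 with hneg | hpos
      · rw [toChars_of_neg hneg] at h
        have hdash : c = '-' := by simpa using congrArg (fun l => l.head?) h
        have : c ≠ '-' := by fin_cases hc <;> decide
        exact this hdash
      · have hch : PySem.Int.toChars d = [Nat.digitChar d.toNat] := toChars_small hpos hd9
        rw [hch] at h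
        have hcd : c = Nat.digitChar d.toNat := by simpa using congrArg (fun l => l.head?) h
        exact hval (by rw [hcd]; exact dval_digitChar hpos hd9)

theorem good_short {l : List Char} (h : l.length ≤ 1) : good l = true := by
  match l, h with
  | [], _ => rfl
  | [_], _ => rfl

theorem good_cons_cons (a b : Char) (r : List Char) :
    good (a :: b :: r) = ((dval b == dval a - 1) && good (b :: r)) := rfl

theorem good_eq_goodFrom_aux (cs : List Char) : ∀ c, good (c :: cs) = goodFrom (dval c - 1) cs := by
  induction cs with
  | nil => intro c; rfl
  | cons b r ih =>
    intro c
    rw [good_cons_cons, ih b]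
    by_cases h : dval b = dval c - 1
    · simp [goodFrom, h]
    · have hbeq : (dval b == dval c - 1) = false := by simp [h]
      simp [goodFrom, hbeq]

theorem good_eq_goodFrom (c : Char) (cs : List Char) :
    good (c :: cs) = goodFrom (dval c) (c :: cs) := by
  simp [goodFrom, good_eq_goodFrom_aux]

-- A's indexed loop computes `good` of the remaining suffix
theorem decSeqLoop_eq_good (s : String) (hl : ∀ c ∈ s.toList, c ∈ digs) :
    ∀ k : Nat, decSeqLoop s (PySem.List.pyRange (k : Int) (PySem.Str.len s - 1) 1)
      = some (good (s.toList.drop k)) := by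
  have hlen : PySem.Str.len s = (s.toList.length : Int) := PySem.Str.len_eq s
  suffices h : ∀ m k, s.toList.length - k ≤ m →
      decSeqLoop s (PySem.List.pyRange (k : Int) (PySem.Str.len s - 1) 1)
        = some (good (s.toList.drop k)) from fun k => h _ k le_rfl
  intro m
  induction m with
  | zero =>
    intro k hk
    rw [hlen, PySem.List.pyRange_one_eq_nil (by omega)]
    rw [List.drop_of_length_le (by omega)]
    rfl
  | succ m ih =>
    intro k hk
    by_cases hend : s.toList.length ≤ k + 1
    · rw [hlen, PySem.List.pyRange_one_eq_nil (by omega)]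
      rw [good_short (l := s.toList.drop k) (by rw [List.length_drop]; omega)]
      rfl
    · have hk1 : k + 1 < s.toList.length := by omega
      have hk0 : k < s.toList.length := by omega
      have g1 : PySem.Str.pyGet? s ((k : Int) + 1) = some (s.toList[k+1]) := by
        have e1 : ((k : Int) + 1) = ((k + 1 : Nat) : Int) := by push_cast; ring
        rw [e1, PySem.Str.pyGet?_natCast, List.getElem?_eq_getElem hk1]
      have g0 : PySem.Str.pyGet? s (k : Int) = some (s.toList[k]) := by
        rw [PySem.Str.pyGet?_natCast, List.getElem?_eq_getElem hk0]
      rw [hlen, PySem.List.pyRange_one_cons (by omega)]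
      simp only [decSeqLoop, g1, g0,
        ofChars?_digit (hl _ (List.getElem_mem hk1)), ofChars?_digit (hl _ (List.getElem_mem hk0))]
      rw [List.drop_eq_getElem_cons hk0, List.drop_eq_getElem_cons hk1, good_cons_cons,
        ← List.drop_eq_getElem_cons hk1]
      have ecast : ((k : Int) + 1) = ((k + 1 : Nat) : Int) := by push_cast; ring
      by_cases hv : dval (s.toList[k+1]) = dval (s.toList[k]) - 1
      · rw [if_neg (by simp [hv])]
        have hih := ih (k + 1) (by omega)
        rw [hlen] at hih
        rw [ecast, hih]
        simp [hv]
      · rw [if_pos (by simpa using hv)]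
        have hbeq : (dval (s.toList[k+1]) == dval (s.toList[k]) - 1) = false := by simp [hv]
        rw [hbeq, Bool.false_and]

-- the post-trim core: A's loop verdict equals B's equality check, for any nonempty all-digit string
theorem core_eq (ns : String) (hne : ns.toList ≠ []) (hd : ∀ c ∈ ns.toList, c ∈ digs) :
    (decSeqLoop ns (PySem.List.pyRange 0 (PySem.Str.len ns - 1) 1)).getD false
      = altCheck ns := by
  unfold altCheck
  obtain ⟨c, cs, hcons⟩ : ∃ c cs, ns.toList = c :: cs := by
    cases h : ns.toList with
    | nil => exact absurd h hne
    | cons a l => exact ⟨a, l, rfl⟩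
  have hc : c ∈ digs := hd c (by rw [hcons]; exact List.mem_cons_self ..)
  -- left side
  have hloop := decSeqLoop_eq_good ns hd 0
  rw [Nat.cast_zero, List.drop_zero] at hloop
  rw [hloop, Option.getD_some]
  -- right side scrutinees
  have hget0 : PySem.Str.pyGet? ns 0 = some c := by
    have : (0 : Int) = ((0 : Nat) : Int) := rfl
    rw [this, PySem.Str.pyGet?_natCast, hcons]
    rfl
  simp only [hget0, ofChars?_digit hc]
  -- turn B's string equality into a list equality against the flattened expected chars
  rw [Bool.beq_eq_decide_eq]
  have hexp : (PySem.Str.join ""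
      ((PySem.List.pyRange 0 (PySem.Str.len ns) 1).map (fun i => PySem.Int.toStr (dval c - i)))).toList
        = ((List.range ns.toList.length).map (fun i : Nat => PySem.Int.toChars (dval c - i))).flatten := by
    rw [PySem.Str.toList_join, List.map_map]
    have hnil : ("" : String).toList = [] := rfl
    rw [hnil, join_nil_eq_flatten, PySem.Str.len_eq, PySem.List.pyRange_one, List.map_map]
    have hlen : (((ns.toList.length : Int)) - 0).toNat = ns.toList.length := by omega
    rw [hlen]
    congr 1
    apply List.map_congr_left
    intro i _
    simp only [Function.comp, PySem.Int.toList_toStr]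
    congr 1
    ring
  have hiff : (ns = PySem.Str.join ""
        ((PySem.List.pyRange 0 (PySem.Str.len ns) 1).map (fun i => PySem.Int.toStr (dval c - i))))
      ↔ (ns.toList = ((List.range ns.toList.length).map (fun i : Nat => PySem.Int.toChars (dval c - i))).flatten) := by
    rw [← hexp]
    exact String.toList_inj.symm
  simp only [hiff]
  -- A's verdict equals the same decide via goodFrom
  simp only [hcons]
  rw [good_eq_goodFrom]
  rw [goodFrom_eq_decide (c :: cs) (by rw [← hcons]; exact hd) (dval c) (dval_bounds hc).2]

-- main assembly
set_option maxHeartbeats 1600000 in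
theorem dec_seq_eq_alt_of_pos (number : Int) (h1 : 1 ≤ number) :
    dec_seq number = dec_seq_alt number := by
  have htl : (PySem.Int.toStr number).toList = Nat.toDigits 10 number.toNat := by
    rw [PySem.Int.toList_toStr, toChars_of_nonneg (by omega)]
  have hdigs : ∀ c ∈ (PySem.Int.toStr number).toList, c ∈ digs := by
    intro c hcmem
    rw [htl, Nat.toDigits] at hcmem
    exact toDigitsCore_mem (by simp) c hcmem
  have hnn : (PySem.Int.toStr number).toList ≠ [] := by
    rw [htl]; exact toDigits_ne_nil _
  have hlast : PySem.Str.pyGet? (PySem.Int.toStr number) (-1)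
      = some ((PySem.Int.toStr number).toList.getLast hnn) := by
    rw [PySem.Str.pyGet?_eq]
    show PySem.List.pyGet? _ _ = _
    rw [PySem.List.pyGet?_neg_one, List.getLast?_eq_getLast]
  by_cases h0 : (PySem.Int.toStr number).toList.getLast hnn = '0'
  · -- last digit is '0'; then the string has at least two characters
    have h2 : 2 ≤ (PySem.Int.toStr number).toList.length := by
      by_contra hlt
      push_neg at hlt
      have hpos := List.length_pos_of_ne_nil hnn
      have hn1 : (PySem.Int.toStr number).toList.length = 1 := by omega
      have hm9 : number ≤ 9 := by
        by_contra h10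
        push_neg at h10
        have := toDigits_len2_of_ge10 (m := number.toNat) (by omega)
        rw [← htl] at this
        omega
      have hsmall : (PySem.Int.toStr number).toList = [Nat.digitChar number.toNat] := by
        rw [PySem.Int.toList_toStr, toChars_small (by omega) hm9]
      have hgl? : (PySem.Int.toStr number).toList.getLast? = some (Nat.digitChar number.toNat) := by
        rw [hsmall]; rfl
      rw [List.getLast?_eq_getLast hnn, h0] at hgl?
      have hdc : Nat.digitChar number.toNat = '0' := (Option.some_injective _ hgl?).symm
      have := dval_digitChar (e := number) (by omega) hm9
      rw [hdc] at this
      simp [dval] at this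
      omega
    have hn2 : (PySem.Int.toStr number).toList.length - 2 < (PySem.Int.toStr number).toList.length := by omega
    have hsnd : PySem.Str.pyGet? (PySem.Int.toStr number) (-2)
        = some ((PySem.Int.toStr number).toList[(PySem.Int.toStr number).toList.length - 2]) := by
      rw [PySem.Str.pyGet?_eq]
      show PySem.List.pyGet? _ _ = _
      rw [PySem.List.pyGet?_neg_ofNat _ 2 (by omega) (by omega), List.getElem?_eq_getElem hn2]
    by_cases h1c : (PySem.Int.toStr number).toList[(PySem.Int.toStr number).toList.length - 2] = '1'
    · -- trimmed on both sides
      have hsuf : PySem.Str.endswith (PySem.Int.toStr number) "10" = true := by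
        rw [PySem.Str.endswith_eq]
        apply (PySem.Chars.endswith_iff _ _).mpr
        refine ⟨(PySem.Int.toStr number).toList.take ((PySem.Int.toStr number).toList.length - 2), ?_⟩
        have hdrop : (PySem.Int.toStr number).toList.drop ((PySem.Int.toStr number).toList.length - 2)
            = ['1', '0'] := by
          rw [List.drop_eq_getElem_cons hn2, h1c, List.drop_eq_getElem_cons (by omega)]
          have e1 : (PySem.Int.toStr number).toList.length - 2 + 1
              = (PySem.Int.toStr number).toList.length - 1 := by omega
          simp only [e1]
          rw [← List.getLast_eq_getElem hnn, h0, List.drop_of_length_le (by omega)]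
        have h10 : ("10" : String).toList = ['1', '0'] := rfl
        show _ ++ ("10" : String).toList = _
        rw [h10, ← hdrop]
        exact List.take_append_drop _ _
      simp only [dec_seq, dec_seq_alt, hlast, h0, hsnd, h1c, hsuf, if_true]
      have hne' : (PySem.Str.slice (PySem.Int.toStr number) none (some (-1))).toList ≠ [] := by
        rw [PySem.Str.slice_to_neg_one]
        have hpos : 0 < (PySem.Int.toStr number).toList.dropLast.length := by
          rw [List.length_dropLast]; omega
        exact List.ne_nil_of_length_pos hpos
      have hd' : ∀ x ∈ (PySem.Str.slice (PySem.Int.toStr number) none (some (-1))).toList, x ∈ digs := by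
        intro x hx
        rw [PySem.Str.slice_to_neg_one] at hx
        exact hdigs x (List.mem_of_mem_dropLast hx)
      exact core_eq _ hne' hd'
    · -- last is '0' but second-last is not '1': neither side trims
      have hsuf : PySem.Str.endswith (PySem.Int.toStr number) "10" = false := by
        rw [PySem.Str.endswith_eq]
        apply Bool.eq_false_iff.mpr
        intro hcontra
        obtain ⟨t, ht⟩ := (PySem.Chars.endswith_iff _ _).mp hcontra
        have hlen : t.length + 2 = (PySem.Int.toStr number).toList.length := by
          have := congrArg List.length ht
          simpa using this
        apply h1c
        have : (PySem.Int.toStr number).toList[(PySem.Int.toStr number).toList.length - 2]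
            = (t ++ ("10").toList)[t.length]'(by simp) := by
          congr 1
          · exact ht.symm
          · omega
        rw [this, List.getElem_append_right (le_refl _)]
        simp
      simp only [dec_seq, dec_seq_alt, hlast, h0, hsnd, if_neg h1c, hsuf,
        Bool.false_eq_true, if_false]
      exact core_eq _ hnn hdigs
  · -- last digit is not '0': neither side trims
    have hsuf : PySem.Str.endswith (PySem.Int.toStr number) "10" = false := by
      rw [PySem.Str.endswith_eq]
      apply Bool.eq_false_iff.mpr
      intro hcontra
      obtain ⟨t, ht⟩ := (PySem.Chars.endswith_iff _ _).mp hcontra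
      apply h0
      have : (PySem.Int.toStr number).toList.getLast? = some '0' := by
        rw [← ht]
        show (t ++ ['1', '0']).getLast? = some '0'
        simp
      rw [List.getLast?_eq_getLast hnn] at this
      exact Option.some_injective _ this
    simp only [dec_seq, dec_seq_alt, hlast, if_neg h0, hsuf, Bool.false_eq_true, if_false]
    exact core_eq _ hnn hdigs

-- ===== VERDICT (by name: the statement is the Claim_ definition above) =====
theorem dec_seq_spec : Claim_equal_dec_seq := by
  unfold Claim_equal_dec_seq Spec_dec_seq
  intro number _ hpre
  exact dec_seq_eq_alt_of_pos number hpre
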